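-- pv_equiv track=rewrite | github.com/KPI68/random_projects | assign_tasks.py | alloc
-- ===== SOURCE A (Python) =====
-- def alloc(dict, values, allocd, lastPair):
--     if len(dict)==0 or len(values)==0:
--         return allocd
--
--     d=dict.copy()
--     v=values.copy()
--
--     k1st=list(d.keys())[0]
--     if len(lastPair)>0:
--         try:
--             d[k1st].remove(lastPair[1])
--         except:
--             pass
--
--     if len(d[k1st])>0:
--         v1st=d[k1st][0]
--     else:
--         v1st='*'
--
--     del d[k1st]
--     if v1st in v:
--         v.remove(v1st)
--     else:
--         v1st='*'
--
--     allocd=alloc(d, v, allocd, (k1st,v1st))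
--     return allocd + [(k1st,v1st)]
-- ===== SOURCE B (Python) =====
-- def alloc(dict, values, allocd, lastPair):
--     # Single forward pass: candidate chosen by looking at the first two entries
--     # of each key's list (the previous assignment can only shadow the head),
--     # availability tracked in a hash-map multiset; output reversed at the end.
--     avail = {}
--     for x in values:
--         avail[x] = avail.get(x, 0) + 1
--     remaining = len(values)
--     prev = lastPair[1] if len(lastPair) > 1 else None
--     pairs = []
--     for k, cands in dict.items():
--         if remaining == 0:
--             break
--         if cands and cands[0] != prev:
--             cand = cands[0]
--         elif len(cands) > 1:
--             cand = cands[1]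
--         else:
--             cand = '*'
--         if avail.get(cand, 0) > 0:
--             avail[cand] -= 1
--             remaining -= 1
--         else:
--             cand = '*'
--         pairs.append((k, cand))
--         prev = cand
--     return allocd + pairs[::-1]
-- ===== Notes on version B (the rewrite author's own statement) =====
-- stated objective: faster
-- what changed: Replaces A's recursion with per-level dict/list copies and O(n) list.remove / 'in' scans by a single forward loop that picks each candidate from the first two entries of the key's list and tracks available values in a hash-map multiset, reversing the collected pairs at the end.
import Mathlib
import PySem

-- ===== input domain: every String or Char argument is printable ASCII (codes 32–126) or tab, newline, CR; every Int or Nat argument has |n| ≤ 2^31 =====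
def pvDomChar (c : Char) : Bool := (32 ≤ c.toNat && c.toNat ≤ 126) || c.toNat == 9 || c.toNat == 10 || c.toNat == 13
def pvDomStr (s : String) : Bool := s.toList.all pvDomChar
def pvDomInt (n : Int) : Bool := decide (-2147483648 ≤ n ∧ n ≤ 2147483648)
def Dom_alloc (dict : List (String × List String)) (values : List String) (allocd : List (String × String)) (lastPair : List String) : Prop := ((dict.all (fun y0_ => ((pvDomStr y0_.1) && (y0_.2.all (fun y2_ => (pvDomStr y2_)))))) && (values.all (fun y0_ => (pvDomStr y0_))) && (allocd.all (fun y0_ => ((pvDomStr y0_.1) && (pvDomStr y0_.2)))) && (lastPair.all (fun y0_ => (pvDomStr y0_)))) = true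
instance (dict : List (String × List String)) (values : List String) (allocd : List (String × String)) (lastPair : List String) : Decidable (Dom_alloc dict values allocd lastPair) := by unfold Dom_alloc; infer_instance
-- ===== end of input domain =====

-- B replaces A's O(n^2) recursion (list.remove / `in` scans and per-level dict copies) by one
-- forward pass with a hash-map multiset of the available values, reversing the output at the end.
-- Equivalence is about the RETURN value only: A mutates the candidate lists inside `dict` in
-- place (shallow copies), B does not.

-- ===== PORT A =====
def alloc (dict : List (String × List String)) (values : List String) (allocd : List (String × String)) (lastPair : List String) : List (String × String) :=
  match dict with
  | [] => allocd
  | (k1st, cands) :: rest =>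
    if values.length == 0 then allocd
    else
      -- `if len(lastPair)>0: try: d[k1st].remove(lastPair[1]) except: pass`
      let cands1 :=
        if lastPair.length > 0 then
          match PySem.List.pyGet? lastPair 1 with
          | some p => (PySem.List.remove? cands p).getD cands   -- ValueError is swallowed
          | none => cands                                        -- IndexError is swallowed
        else cands
      let v1st := match cands1 with | [] => "*" | c :: _ => c
      match PySem.List.remove? values v1st with
      | some v' => alloc rest v' allocd [k1st, v1st] ++ [(k1st, v1st)]
      | none => alloc rest values allocd [k1st, "*"] ++ [(k1st, "*")]

-- ===== PORT B =====
-- candidate for one key: A's "remove prev, take head" can only be affected at the head,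
-- so B inspects the first two entries only
def pickCand (prev : Option String) (cands : List String) : String :=
  match cands with
  | [] => "*"
  | c0 :: rest => if prev = some c0 then (match rest with | [] => "*" | c1 :: _ => c1) else c0

def allocAltStep (s : PySem.Dict String Int × Int × Option String × List (String × String))
    (kc : String × List String) : PySem.Dict String Int × Int × Option String × List (String × String) :=
  let (avail, remaining, prev, pairs) := s
  if remaining == 0 then s    -- `break`: state is left unchanged from here on
  else
    let cand := pickCand prev kc.2
    if avail.getD cand 0 > 0 then
      (avail.insert cand (avail.getD cand 0 - 1), remaining - 1, some cand, pairs ++ [(kc.1, cand)])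
    else
      (avail, remaining, some "*", pairs ++ [(kc.1, "*")])

def alloc_alt (dict : List (String × List String)) (values : List String) (allocd : List (String × String)) (lastPair : List String) : List (String × String) :=
  let avail := values.foldl (fun d x => d.insert x (d.getD x 0 + 1)) PySem.Dict.empty
  let prev : Option String := if lastPair.length > 1 then PySem.List.pyGet? lastPair 1 else none
  let st := dict.foldl allocAltStep (avail, (values.length : Int), prev, [])
  allocd ++ st.2.2.2.reverse

-- ===== PRECONDITION & SPEC =====
def Spec_alloc (dict : List (String × List String)) (values : List String) (allocd : List (String × String)) (lastPair : List String) (out : List (String × String)) : Prop := out = alloc_alt dict values allocd lastPair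
instance (dict : List (String × List String)) (values : List String) (allocd : List (String × String)) (lastPair : List String) (out : List (String × String)) : Decidable (Spec_alloc dict values allocd lastPair out) := by unfold Spec_alloc; infer_instance

-- ===== CLAIM (what is proved, stated in full; the proofs are below) =====
def Claim_equal_alloc : Prop := ∀ (dict : List (String × List String)) (values : List String) (allocd : List (String × String)) (lastPair : List String), Dom_alloc dict values allocd lastPair → Spec_alloc dict values allocd lastPair (alloc dict values allocd lastPair)

-- ===== LEMMAS AND PROOFS =====

-- forward-order specification of B's fold (proof helper)
def coreAlt (dict : List (String × List String)) (avail : PySem.Dict String Int) (remaining : Int) (prev : Option String) : List (String × String) :=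
  match dict with
  | [] => []
  | (k, cands) :: rest =>
    if remaining == 0 then []
    else
      let cand := pickCand prev cands
      if avail.getD cand 0 > 0 then
        (k, cand) :: coreAlt rest (avail.insert cand (avail.getD cand 0 - 1)) (remaining - 1) (some cand)
      else
        (k, "*") :: coreAlt rest avail remaining (some "*")

lemma coreAlt_zero (dict : List (String × List String)) (avail : PySem.Dict String Int) (prev : Option String) :
    coreAlt dict avail 0 prev = [] := by
  cases dict with
  | nil => rfl
  | cons p rest => obtain ⟨k, cands⟩ := p; simp [coreAlt]

lemma foldl_step_pairs (dict : List (String × List String)) :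
    ∀ (avail : PySem.Dict String Int) (rem : Int) (prev : Option String) (pairs : List (String × String)),
    (dict.foldl allocAltStep (avail, rem, prev, pairs)).2.2.2 = pairs ++ coreAlt dict avail rem prev := by
  induction dict with
  | nil => intro avail rem prev pairs; simp [coreAlt]
  | cons p rest ih =>
    intro avail rem prev pairs
    obtain ⟨k, cands⟩ := p
    by_cases h0 : rem = 0
    · subst h0
      simp [allocAltStep, ih, coreAlt_zero, coreAlt]
    · simp only [List.foldl_cons, allocAltStep, beq_iff_eq, if_neg h0]
      by_cases hav : (avail.getD (pickCand prev cands) 0) > 0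
      · simp only [if_pos hav, ih, coreAlt, beq_iff_eq, if_neg h0, List.append_assoc]
        rfl
      · simp only [if_neg hav, ih, coreAlt, beq_iff_eq, if_neg h0, List.append_assoc]
        rfl

-- A's "remove lastPair[1] from the list, then take the head" equals B's two-entry inspection
lemma head_remove_eq (cands : List String) (p : String) :
    (match (PySem.List.remove? cands p).getD cands with | [] => "*" | c :: _ => c)
      = pickCand (some p) cands := by
  cases cands with
  | nil => simp [PySem.List.remove?, pickCand]
  | cons c0 rest =>
    by_cases hc : c0 = p
    · subst hc
      cases rest <;> simp [pickCand]
    · rw [PySem.List.remove?_cons_of_ne rest hc]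
      cases h : PySem.List.remove? rest p with
      | none => simp [pickCand]; exact fun h2 => absurd h2.symm hc
      | some t => simp [pickCand]; exact fun h2 => absurd h2.symm hc

-- the guarded lastPair access in A collapses to pyGet? lastPair 1
lemma cands1_eq (cands lastPair : List String) :
    (if lastPair.length > 0 then
        match PySem.List.pyGet? lastPair 1 with
        | some p => (PySem.List.remove? cands p).getD cands
        | none => cands
      else cands)
      = (match PySem.List.pyGet? lastPair 1 with
        | some p => (PySem.List.remove? cands p).getD cands
        | none => cands) := by
  by_cases h : lastPair.length > 0
  · simp [h]
  · have : lastPair = [] := by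
      cases lastPair with
      | nil => rfl
      | cons a l => simp at h
    subst this
    simp [PySem.List.pyGet?]

lemma pyGet?_one_short (lastPair : List String) (h : ¬ lastPair.length > 1) :
    PySem.List.pyGet? lastPair 1 = none := by
  cases lastPair with
  | nil => rfl
  | cons a l =>
    cases l with
    | nil => rfl
    | cons b t => simp at h

lemma pyGet?_pair (k v : String) : PySem.List.pyGet? [k, v] 1 = some v := by
  rfl

-- main invariant: A on the value LIST equals B's core on the value MULTISET
lemma alloc_eq_core (dict : List (String × List String)) :
    ∀ (values : List String) (allocd : List (String × String)) (lastPair : List String)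
      (avail : PySem.Dict String Int),
    (∀ x, avail.getD x 0 = (values.count x : Int)) →
    alloc dict values allocd lastPair
      = allocd ++ (coreAlt dict avail (values.length : Int) (PySem.List.pyGet? lastPair 1)).reverse := by
  induction dict with
  | nil => intro values allocd lastPair avail _; simp [alloc, coreAlt]
  | cons p rest ih =>
    intro values allocd lastPair avail hinv
    obtain ⟨k, cands⟩ := p
    by_cases hv : values = []
    · subst hv
      simp [alloc, coreAlt_zero]
    · have hlen : values.length ≠ 0 := by simpa using hv
      rw [alloc]
      simp only [beq_iff_eq, if_neg hlen]
      rw [cands1_eq]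
      set prev := PySem.List.pyGet? lastPair 1 with hprev
      have hcand :
          (match (match prev with
                  | some p => (PySem.List.remove? cands p).getD cands
                  | none => cands) with
            | [] => "*" | c :: _ => c) = pickCand prev cands := by
        cases prev with
        | none =>
          cases cands with
          | nil => rfl
          | cons c0 r => simp [pickCand]
        | some p => exact head_remove_eq cands p
      rw [hcand]
      have hzc : ¬ (((values.length : Int) == 0) = true) := by
        simp [hlen]
      cases hrm : PySem.List.remove? values (pickCand prev cands) with
      | some v' =>
        have hmem : pickCand prev cands ∈ values := by
          by_contra hn
          rw [(PySem.List.remove?_eq_none_iff values (pickCand prev cands)).mpr hn] at hrm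
          exact absurd hrm (by simp)
        have hv' : v' = values.erase (pickCand prev cands) := by
          have h2 := PySem.List.remove?_eq_some_erase values _ hmem
          rw [h2] at hrm; exact (Option.some.injEq _ _).mp hrm.symm
        have hpos : avail.getD (pickCand prev cands) 0 > 0 := by
          rw [hinv]
          exact_mod_cast List.count_pos_iff.mpr hmem
        show alloc rest v' allocd [k, pickCand prev cands] ++ [(k, pickCand prev cands)]
              = allocd ++ (coreAlt ((k, cands) :: rest) avail (values.length : Int) prev).reverse
        rw [ih v' allocd [k, pickCand prev cands]
              (avail.insert (pickCand prev cands) (avail.getD (pickCand prev cands) 0 - 1))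
              ?_]
        · have hlen' : (v'.length : Int) = (values.length : Int) - 1 := by
            subst hv'
            have := List.length_erase_of_mem hmem
            omega
          rw [pyGet?_pair, hlen', coreAlt, if_neg hzc, if_pos hpos,
            List.reverse_cons, List.append_assoc]
        · intro x
          subst hv'
          rw [PySem.Dict.getD_insert]
          by_cases hx : x = pickCand prev cands
          · have hcp : 0 < values.count (pickCand prev cands) := List.count_pos_iff.mpr hmem
            rw [if_pos hx, hinv, hx, List.count_erase_self]
            omega
          · rw [if_neg hx, hinv, List.count_erase_of_ne hx]
      | none =>
        have hmem : pickCand prev cands ∉ values := by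
          intro hmem
          rw [PySem.List.remove?_eq_some_erase values _ hmem] at hrm
          exact absurd hrm (by simp)
        have hzero : ¬ avail.getD (pickCand prev cands) 0 > 0 := by
          rw [hinv]
          have : values.count (pickCand prev cands) = 0 := List.count_eq_zero.mpr hmem
          simp [this]
        show alloc rest values allocd [k, "*"] ++ [(k, "*")]
              = allocd ++ (coreAlt ((k, cands) :: rest) avail (values.length : Int) prev).reverse
        rw [ih values allocd [k, "*"] avail hinv]
        rw [pyGet?_pair, coreAlt, if_neg hzc, if_neg hzero,
          List.reverse_cons, List.append_assoc]

lemma counter_inv (values : List String) (x : String) :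
    (values.foldl (fun d y => d.insert y (d.getD y 0 + 1)) PySem.Dict.empty).getD x 0
      = (values.count x : Int) := by
  rw [PySem.Dict.getD_foldl_insert_add_one]
  simp

lemma prev_init_eq (lastPair : List String) :
    (if lastPair.length > 1 then PySem.List.pyGet? lastPair 1 else none)
      = PySem.List.pyGet? lastPair 1 := by
  by_cases h : lastPair.length > 1
  · simp [h]
  · rw [pyGet?_one_short lastPair h]; simp

-- ===== VERDICT (by name: the statement is the Claim_ definition above) =====
theorem alloc_spec : Claim_equal_alloc := by
  intro dict values allocd lastPair _
  unfold Spec_alloc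
  simp only [alloc_alt]
  rw [foldl_step_pairs, List.nil_append, prev_init_eq]
  exact alloc_eq_core dict values allocd lastPair _ (counter_inv values)
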